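-- pv_equiv track=rewrite | github.com/cj05/Hexi | swindler.py | ixed_factorial
-- ===== SOURCE A (Python) =====
-- class Factorial:
--     def __init__(self):
--         self.acc = 1
--         self.n = 1
--
--     def __iter__(self):
--         return self
--
--     def __next__(self):
--         val = self.acc
--         self.acc *= self.n
--         self.n += 1
--         return val
--
-- def ixed_factorial(value, stack):
--     strides = []
--     fact_iter = Factorial()
--
--     # Collect strides (factorials) while they are less than or equal to value
--     while True:
--         stride = next(fact_iter)
--         if stride > value:
--             break
--         strides.append(stride)
--
--     # Check if the stack can accommodate the manipulations
--     if len(stack) < len(strides):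
--         raise ValueError("Manipulating too many elements on the stack!")
--
--     stride_offset = len(stack) - len(strides)
--     edit_target = stack[stride_offset:]
--     swap = edit_target.copy()
--     output = []
--     while strides:
--         divisor = strides.pop()
--         index = value // divisor
--         value %= divisor
--         output.append(swap.pop(index))
--
--     return output
-- ===== SOURCE B (Python) =====
-- def ixed_factorial(value, stack):
--     # Phase 0: factorials 1, 1, 2, 6, ... while <= value
--     facts = []
--     f = n = 1
--     while f <= value:
--         facts.append(f)
--         f *= n
--         n += 1
--     k = len(facts)
--     if len(stack) < k:
--         raise ValueError("Manipulating too many elements on the stack!")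
--     tail = stack[len(stack) - k:]
--     # Phase 1: extract all factorial-base digits first (most significant divisor first)
--     digits = []
--     for d in reversed(facts):
--         digits.append(value // d)
--         value %= d
--     # Phase 2: order-statistics selection over a boolean occupancy array:
--     # for each digit dg, pick the dg-th still-free slot of the tail.
--     taken = [False] * k
--     out = []
--     for dg in digits:
--         for j in range(k):
--             if not taken[j]:
--                 if dg == 0:
--                     taken[j] = True
--                     out.append(tail[j])
--                     break
--                 dg -= 1
--     return out
-- ===== Notes on version B (the rewrite author's own statement) =====
-- stated objective: alternative
-- what changed: A interleaves factorial-base division with pop-on-a-shrinking-copy of the stack tail; B first extracts the full factorial-base digit string and then resolves each digit by order-statistics selection over a boolean occupancy array (pick the dg-th still-free slot), never shrinking a list.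
import Mathlib
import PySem

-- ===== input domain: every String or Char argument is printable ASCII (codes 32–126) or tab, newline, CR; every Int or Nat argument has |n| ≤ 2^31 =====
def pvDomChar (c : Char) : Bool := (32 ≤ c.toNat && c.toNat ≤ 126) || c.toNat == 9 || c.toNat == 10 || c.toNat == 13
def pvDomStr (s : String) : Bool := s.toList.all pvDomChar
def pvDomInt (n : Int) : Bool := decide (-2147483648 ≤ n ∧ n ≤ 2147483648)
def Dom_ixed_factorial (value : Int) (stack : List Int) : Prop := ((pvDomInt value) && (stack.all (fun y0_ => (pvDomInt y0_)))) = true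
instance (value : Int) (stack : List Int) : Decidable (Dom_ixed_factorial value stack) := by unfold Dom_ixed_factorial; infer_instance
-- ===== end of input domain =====

-- B replaces A's interleaved divide-and-pop on a shrinking copy of the stack tail by a
-- digits-first decode plus order-statistics selection over a boolean occupancy array
-- (alternative structure, same asymptotic cost).

-- ===== PORT A =====
-- the Factorial iterator + collection while-loop; fuel (value+2).toNat is enough steps,
-- as the loop stops as soon as acc = (n-1)! exceeds value
def pyFactCollect : Nat → Int → Int → Int → List Int
  | 0, _, _, _ => []
  | fuel+1, value, acc, n =>
    if acc > value then []
    else acc :: pyFactCollect fuel value (acc * n) (n + 1)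

-- `while strides: divisor = strides.pop(); ...` consumes strides back-to-front,
-- so the loop is recursion over strides.reverse
def aLoop : List Int → Int → List Int → List Int → List Int
  | [], _, _, output => output
  | divisor :: rest, value, swap, output =>
    let index := PySem.Int.floordiv value divisor
    let value' := PySem.Int.mod value divisor
    match PySem.List.pop? swap index with
    | none => output            -- IndexError (unreachable on inputs admitted by Pre_)
    | some (x, swap') => aLoop rest value' swap' (output ++ [x])

def ixed_factorial (value : Int) (stack : List Int) : List Int :=
  let strides := pyFactCollect (value + 2).toNat value 1 1
  if stack.length < strides.length then []   -- raise ValueError: excluded by Pre_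
  else
    let strideOffset : Nat := stack.length - strides.length
    let editTarget := PySem.List.slice stack (some (strideOffset : Int)) none
    aLoop strides.reverse value editTarget []

-- ===== PORT B =====
-- phase 0 of Source B: same factorial collection loop
def bFactCollect : Nat → Int → Int → Int → List Int
  | 0, _, _, _ => []
  | fuel+1, value, f, n =>
    if f > value then []
    else f :: bFactCollect fuel value (f * n) (n + 1)

-- phase 1 of Source B: all factorial-base digits, most significant divisor first
def bDigits : List Int → Int → List Int
  | [], _ => []
  | d :: ds, value => PySem.Int.floordiv value d :: bDigits ds (PySem.Int.mod value d)

-- the inner `for j in range(k)` scan of Source B: index of the dg-th still-free slot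
def bFind : List Bool → Int → Option Nat
  | [], _ => none
  | t :: rest, dg =>
    if t then (bFind rest dg).map Nat.succ
    else if dg = 0 then some 0
    else (bFind rest (dg - 1)).map Nat.succ

-- phase 2 of Source B: occupancy-array selection (none = scan fell through, unreachable)
def bSelect : List Int → List Bool → List Int → List Int → List Int
  | [], _, _, out => out
  | dg :: ds, taken, tail, out =>
    match bFind taken dg with
    | some j => bSelect ds (taken.set j true) tail (out ++ [tail.getD j 0])
    | none => bSelect ds taken tail out

def ixed_factorial_alt (value : Int) (stack : List Int) : List Int :=
  let facts := bFactCollect (value + 2).toNat value 1 1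
  let k := facts.length
  if stack.length < k then []                -- raise ValueError: excluded by Pre_
  else
    let tail := PySem.List.slice stack (some ((stack.length - k : Nat) : Int)) none
    bSelect (bDigits facts.reverse value) (List.replicate k false) tail []

-- ===== PRECONDITION & SPEC =====
-- closed-form threshold table: how many strides A collects; exact for every value < 13!
-- (Dom_ixed_factorial gives |value| ≤ 2^31 < 13!, so the table is exact on the whole domain)
def strideCount (value : Int) : Nat :=
  if value < 1 then 0
  else if value < 2 then 2 else if value < 6 then 3 else if value < 24 then 4
  else if value < 120 then 5 else if value < 720 then 6 else if value < 5040 then 7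
  else if value < 40320 then 8 else if value < 362880 then 9 else if value < 3628800 then 10
  else if value < 39916800 then 11 else if value < 479001600 then 12 else 13

-- A raises ValueError exactly when the stack holds fewer elements than the collected strides;
-- Pre_ excludes exactly those inputs (both programs raise there).
def Pre_ixed_factorial (value : Int) (stack : List Int) : Prop :=
  strideCount value ≤ stack.length

instance (value : Int) (stack : List Int) : Decidable (Pre_ixed_factorial value stack) := by
  unfold Pre_ixed_factorial; infer_instance

def pvWitness_ixed_factorial : Int × List Int := (3, [10, 20, 30])

def Spec_ixed_factorial (value : Int) (stack : List Int) (out : List Int) : Prop :=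
  out = ixed_factorial_alt value stack
instance (value : Int) (stack : List Int) (out : List Int) : Decidable (Spec_ixed_factorial value stack out) := by
  unfold Spec_ixed_factorial; infer_instance

-- ===== CLAIM (what is proved, stated in full; the proofs are below) =====
def Claim_equal_ixed_factorial : Prop := ∀ (value : Int) (stack : List Int), Dom_ixed_factorial value stack → Pre_ixed_factorial value stack → Spec_ixed_factorial value stack (ixed_factorial value stack)

-- ===== LEMMAS AND PROOFS =====

-- factorial as a function, F n = n!
def F : Nat → Int
  | 0 => 1
  | n+1 => ((n : Int) + 1) * F n

-- [F j, F (j-1), ..., F 1, F 0]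
def revList : Nat → List Int
  | 0 => [1]
  | j+1 => F (j+1) :: revList j

-- the still-free elements of tail, in order
def dropTaken : List Bool → List Int → List Int
  | [], _ => []
  | _, [] => []
  | t :: ts, x :: xs => if t then dropTaken ts xs else x :: dropTaken ts xs

theorem F_pos (n : Nat) : 0 < F n := by
  induction n with
  | zero => simp [F]
  | succ k ih => simp only [F]; positivity

theorem F_mono {a b : Nat} (h : a ≤ b) : F a ≤ F b := by
  induction b with
  | zero => simp_all
  | succ k ih =>
    rcases Nat.lt_or_ge a (k+1) with hlt | hge
    · calc F a ≤ F k := ih (by omega)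
        _ ≤ ((k : Int) + 1) * F k := by nlinarith [F_pos k]
        _ = F (k+1) := rfl
    · have : a = k + 1 := by omega
      simp [this]

theorem F_ge_self (n : Nat) : (n : Int) ≤ F n := by
  induction n with
  | zero => simp [F]
  | succ k ih => simp only [F]; push_cast; nlinarith [F_pos k]

theorem collect_stop {v a : Int} (h : a > v) (fuel : Nat) (n : Int) :
    pyFactCollect fuel v a n = [] := by
  cases fuel <;> simp [pyFactCollect, h]

theorem bFact_eq_pyFact (fuel : Nat) : ∀ (v a n : Int),
    bFactCollect fuel v a n = pyFactCollect fuel v a n := by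
  induction fuel with
  | zero => intro v a n; rfl
  | succ f ih => intro v a n; simp [bFactCollect, pyFactCollect, ih]

theorem collAux : ∀ (cnt j : Nat) (fuel : Nat) (v : Int),
    cnt ≤ fuel → v < F (j + cnt) → (cnt = 0 ∨ F (j + cnt - 1) ≤ v) →
    pyFactCollect fuel v (F j) ((j : Int) + 1) = (List.range' j cnt).map F := by
  intro cnt
  induction cnt with
  | zero =>
    intro j fuel v _ hv _
    simpa using collect_stop (by simpa using hv) fuel _
  | succ s ih =>
    intro j fuel v hfuel hv hle
    have hFle : F j ≤ v := by
      rcases hle with h | h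
      · omega
      · have hm : F j ≤ F (j + s) := F_mono (by omega : j ≤ j + s)
        have hh : j + (s + 1) - 1 = j + s := by omega
        rw [hh] at h
        exact le_trans hm h
    rcases fuel with _ | f
    · omega
    have hstep : F j * ((j : Int) + 1) = F (j + 1) := by rw [F]; ring
    have hv' : v < F (j + 1 + s) := by
      have hh : j + 1 + s = j + (s + 1) := by omega
      rw [hh]; exact hv
    have hle' : s = 0 ∨ F (j + 1 + s - 1) ≤ v := by
      rcases Nat.eq_zero_or_pos s with rfl | hs
      · exact Or.inl rfl
      · right
        have hh : j + 1 + s - 1 = j + (s + 1) - 1 := by omega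
        rw [hh]
        rcases hle with h | h
        · omega
        · exact h
    have hrec := ih (j + 1) f v (by omega) hv' hle'
    rw [List.range'_succ, List.map_cons]
    simp only [pyFactCollect, gt_iff_lt, if_neg (not_lt.mpr hFle)]
    rw [hstep]
    rw [show ((j : Int) + 1 + 1) = (((j + 1 : Nat)) : Int) + 1 by push_cast; ring, hrec]

theorem strides_char (m : Nat) (v : Int) (h1 : F m ≤ v) (h2 : v < F (m + 1)) :
    pyFactCollect (v + 2).toNat v 1 1 = (List.range' 0 (m + 1)).map F := by
  have hv0 : (m : Int) ≤ v := le_trans (F_ge_self m) h1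
  have := collAux (m + 1) 0 (v + 2).toNat v (by omega) (by simpa using h2)
      (Or.inr (by simpa using h1))
  simpa [F] using this

theorem revList_eq (m : Nat) : ((List.range' 0 (m + 1)).map F).reverse = revList m := by
  induction m with
  | zero => simp [revList, F]
  | succ k ih =>
    rw [List.range'_1_concat]
    simp only [List.map_append, List.reverse_append, List.map_cons, List.map_nil,
      List.reverse_cons, List.reverse_nil, List.nil_append, List.cons_append]
    simp [revList, ih]

theorem dropTaken_replicate : ∀ (tail : List Int),
    dropTaken (List.replicate tail.length false) tail = tail := by
  intro tail
  induction tail with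
  | nil => rfl
  | cons x xs ih => simp [List.replicate, dropTaken, ih]

-- the dg-th free slot: bFind finds it, and popping from the free list corresponds
-- to marking it taken
theorem pick : ∀ (taken : List Bool) (tail : List Int) (n : Nat),
    taken.length = tail.length → n < (dropTaken taken tail).length →
    ∃ j : Nat, bFind taken (n : Int) = some j ∧ j < tail.length ∧
      (dropTaken taken tail).getD n 0 = tail.getD j 0 ∧
      (dropTaken taken tail).eraseIdx n = dropTaken (taken.set j true) tail := by
  intro taken
  induction taken with
  | nil => intro tail n _ hn; simp [dropTaken] at hn
  | cons t ts ih =>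
    intro tail n hlen hn
    rcases tail with _ | ⟨x, xs⟩
    · simp at hlen
    · have hlen' : ts.length = xs.length := by simpa using hlen
      by_cases ht : t
      · subst ht
        have hdt : dropTaken (true :: ts) (x :: xs) = dropTaken ts xs := by
          simp [dropTaken]
        rw [hdt] at hn ⊢
        obtain ⟨j, hf, hj, hg, he⟩ := ih xs n hlen' hn
        refine ⟨j + 1, ?_, by simp only [List.length_cons]; omega, ?_, ?_⟩
        · simp [bFind, hf]
        · simpa using hg
        · rw [List.set_cons_succ]
          have : dropTaken (true :: ts.set j true) (x :: xs)
              = dropTaken (ts.set j true) xs := by simp [dropTaken]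
          rw [this]; exact he
      · simp only [Bool.not_eq_true] at ht; subst ht
        have hdt : dropTaken (false :: ts) (x :: xs) = x :: dropTaken ts xs := by
          simp [dropTaken]
        rw [hdt] at hn ⊢
        rcases n with _ | n
        · refine ⟨0, by simp [bFind], by simp, by simp, ?_⟩
          rw [List.set_cons_zero]
          have : dropTaken (true :: ts) (x :: xs) = dropTaken ts xs := by
            simp [dropTaken]
          rw [this]; simp
        · have hn' : n < (dropTaken ts xs).length := by simpa using hn
          obtain ⟨j, hf, hj, hg, he⟩ := ih xs n hlen' hn'
          refine ⟨j + 1, ?_, by simp only [List.length_cons]; omega, by simpa using hg, ?_⟩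
          · have h0 : (((n + 1 : Nat)) : Int) ≠ 0 := by push_cast; omega
            have h1 : (((n + 1 : Nat)) : Int) - 1 = (n : Int) := by push_cast; ring
            simp only [bFind, if_neg (by simp : ¬ (false = true)), if_neg h0, h1, hf]
            rfl
          · rw [List.set_cons_succ]
            have : dropTaken (false :: ts.set j true) (x :: xs)
                = x :: dropTaken (ts.set j true) xs := by simp [dropTaken]
            rw [this, List.eraseIdx_cons_succ, he]

theorem main_loop : ∀ (j : Nat) (v : Int) (taken : List Bool) (tail out : List Int),
    taken.length = tail.length → 0 ≤ v → v < F (j + 1) →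
    (dropTaken taken tail).length = j + 1 →
    aLoop (revList j) v (dropTaken taken tail) out
      = bSelect (bDigits (revList j) v) taken tail out := by
  intro j
  induction j with
  | zero =>
    intro v taken tail out hlen hv0 hv1 hfree
    have hv : v = 0 := by
      have : v < 1 := by simpa [F] using hv1
      omega
    subst hv
    have hnlt : (0 : Nat) < (dropTaken taken tail).length := by omega
    obtain ⟨j0, hf, hj0, hg, he⟩ := pick taken tail 0 hlen hnlt
    have hpop : PySem.List.pop? (dropTaken taken tail) ((0 : Nat) : Int)
        = some ((dropTaken taken tail).getD 0 0, (dropTaken taken tail).eraseIdx 0) := by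
      rw [PySem.List.pop?_natCast _ 0 hnlt, List.getD_eq_getElem _ _ hnlt]
    have hd : PySem.Int.floordiv 0 1 = ((0 : Nat) : Int) := by decide
    simp only [revList, bDigits, aLoop, bSelect, hd]
    rw [hpop]
    simp only [hf, hg]
  | succ k ih =>
    intro v taken tail out hlen hv0 hv1 hfree
    have hFk : 0 < F (k + 1) := F_pos (k + 1)
    set d := F (k + 1) with hd
    set idx := PySem.Int.floordiv v d with hidx
    have hidx0 : 0 ≤ idx := by
      rw [hidx, PySem.Int.floordiv_eq_ediv_of_pos hFk]
      exact Int.ediv_nonneg hv0 (le_of_lt hFk)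
    have hidxlt : idx < (k : Int) + 2 := by
      rw [hidx, PySem.Int.floordiv_eq_ediv_of_pos hFk]
      have hFsucc : F (k + 1 + 1) = ((k : Int) + 2) * F (k + 1) := by
        rw [F]; push_cast; ring
      exact Int.ediv_lt_of_lt_mul hFk (by rw [← hd] at hFsucc; rw [← hFsucc]; exact hv1)
    set n : Nat := idx.toNat with hn
    have hcast : (n : Int) = idx := Int.toNat_of_nonneg hidx0
    have hnlt : n < (dropTaken taken tail).length := by omega
    obtain ⟨j0, hf, hj0, hg, he⟩ := pick taken tail n hlen hnlt
    have hpop : PySem.List.pop? (dropTaken taken tail) idx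
        = some ((dropTaken taken tail).getD n 0, (dropTaken taken tail).eraseIdx n) := by
      rw [← hcast, PySem.List.pop?_natCast _ n hnlt, List.getD_eq_getElem _ _ hnlt]
    have hmod0 : 0 ≤ PySem.Int.mod v d := by
      rw [PySem.Int.mod_eq_emod_of_pos hFk]
      exact Int.emod_nonneg v (by omega)
    have hmod1 : PySem.Int.mod v d < F (k + 1) := by
      rw [PySem.Int.mod_eq_emod_of_pos hFk]
      exact Int.emod_lt_of_pos v hFk
    rw [hcast] at hf
    simp only [revList, bDigits, aLoop, bSelect, ← hd, ← hidx]
    rw [hpop]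
    simp only [hf, hg]
    have hlen2 : (taken.set j0 true).length = tail.length := by simpa using hlen
    have hfree2 : (dropTaken (taken.set j0 true) tail).length = k + 1 := by
      rw [← he, List.length_eraseIdx_of_lt hnlt]
      omega
    rw [he]
    exact ih (PySem.Int.mod v d) (taken.set j0 true) tail (out ++ [tail.getD j0 0])
      hlen2 hmod0 hmod1 hfree2

-- which interval value lies in, and the matching table entry
theorem interval (v : Int) (h1 : 1 ≤ v) (h2 : v ≤ 2147483648) :
    ∃ m : Nat, F m ≤ v ∧ v < F (m + 1) ∧ strideCount v = m + 1 := by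
  have hF : F 0 = 1 ∧ F 1 = 1 ∧ F 2 = 2 ∧ F 3 = 6 ∧ F 4 = 24 ∧ F 5 = 120 ∧ F 6 = 720 ∧
      F 7 = 5040 ∧ F 8 = 40320 ∧ F 9 = 362880 ∧ F 10 = 3628800 ∧ F 11 = 39916800 ∧
      F 12 = 479001600 ∧ F 13 = 6227020800 := by norm_num [F]
  obtain ⟨e0, e1, e2, e3, e4, e5, e6, e7, e8, e9, e10, e11, e12, e13⟩ := hF
  unfold strideCount
  by_cases c2 : v < 2
  · exact ⟨1, by rw [e1]; omega, by rw [show 1 + 1 = 2 from rfl, e2]; omega, by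
      simp only [if_neg (by omega : ¬ v < 1), if_pos c2]⟩
  by_cases c3 : v < 6
  · exact ⟨2, by rw [e2]; omega, by rw [show 2 + 1 = 3 from rfl, e3]; omega, by
      simp only [if_neg (by omega : ¬ v < 1), if_neg c2, if_pos c3]⟩
  by_cases c4 : v < 24
  · exact ⟨3, by rw [e3]; omega, by rw [show 3 + 1 = 4 from rfl, e4]; omega, by
      simp only [if_neg (by omega : ¬ v < 1), if_neg c2, if_neg c3, if_pos c4]⟩
  by_cases c5 : v < 120
  · exact ⟨4, by rw [e4]; omega, by rw [show 4 + 1 = 5 from rfl, e5]; omega, by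
      simp only [if_neg (by omega : ¬ v < 1), if_neg c2, if_neg c3, if_neg c4, if_pos c5]⟩
  by_cases c6 : v < 720
  · exact ⟨5, by rw [e5]; omega, by rw [show 5 + 1 = 6 from rfl, e6]; omega, by
      simp only [if_neg (by omega : ¬ v < 1), if_neg c2, if_neg c3, if_neg c4, if_neg c5, if_pos c6]⟩
  by_cases c7 : v < 5040
  · exact ⟨6, by rw [e6]; omega, by rw [show 6 + 1 = 7 from rfl, e7]; omega, by
      simp only [if_neg (by omega : ¬ v < 1), if_neg c2, if_neg c3, if_neg c4, if_neg c5, if_neg c6, if_pos c7]⟩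
  by_cases c8 : v < 40320
  · exact ⟨7, by rw [e7]; omega, by rw [show 7 + 1 = 8 from rfl, e8]; omega, by
      simp only [if_neg (by omega : ¬ v < 1), if_neg c2, if_neg c3, if_neg c4, if_neg c5, if_neg c6, if_neg c7, if_pos c8]⟩
  by_cases c9 : v < 362880
  · exact ⟨8, by rw [e8]; omega, by rw [show 8 + 1 = 9 from rfl, e9]; omega, by
      simp only [if_neg (by omega : ¬ v < 1), if_neg c2, if_neg c3, if_neg c4, if_neg c5, if_neg c6, if_neg c7, if_neg c8, if_pos c9]⟩
  by_cases c10 : v < 3628800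
  · exact ⟨9, by rw [e9]; omega, by rw [show 9 + 1 = 10 from rfl, e10]; omega, by
      simp only [if_neg (by omega : ¬ v < 1), if_neg c2, if_neg c3, if_neg c4, if_neg c5, if_neg c6, if_neg c7, if_neg c8, if_neg c9, if_pos c10]⟩
  by_cases c11 : v < 39916800
  · exact ⟨10, by rw [e10]; omega, by rw [show 10 + 1 = 11 from rfl, e11]; omega, by
      simp only [if_neg (by omega : ¬ v < 1), if_neg c2, if_neg c3, if_neg c4, if_neg c5, if_neg c6, if_neg c7, if_neg c8, if_neg c9, if_neg c10, if_pos c11]⟩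
  by_cases c12 : v < 479001600
  · exact ⟨11, by rw [e11]; omega, by rw [show 11 + 1 = 12 from rfl, e12]; omega, by
      simp only [if_neg (by omega : ¬ v < 1), if_neg c2, if_neg c3, if_neg c4, if_neg c5, if_neg c6, if_neg c7, if_neg c8, if_neg c9, if_neg c10, if_neg c11, if_pos c12]⟩
  · exact ⟨12, by rw [e12]; omega, by rw [show 12 + 1 = 13 from rfl, e13]; omega, by
      simp only [if_neg (by omega : ¬ v < 1), if_neg c2, if_neg c3, if_neg c4, if_neg c5, if_neg c6, if_neg c7, if_neg c8, if_neg c9, if_neg c10, if_neg c11, if_neg c12]⟩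

-- ===== VERDICT (by name: the statement is the Claim_ definition above) =====
theorem ixed_factorial_spec : Claim_equal_ixed_factorial := by
  intro value stack hdom hpre
  unfold Spec_ixed_factorial
  have hb : ∀ fuel a n, bFactCollect fuel value a n = pyFactCollect fuel value a n :=
    fun fuel a n => bFact_eq_pyFact fuel value a n
  by_cases hv : value < 1
  · have hempty : pyFactCollect (value + 2).toNat value 1 1 = [] :=
      collect_stop (by omega) _ _
    simp [ixed_factorial, ixed_factorial_alt, hb, hempty, aLoop, bDigits, bSelect]
  · have hdom' : value ≤ 2147483648 := by
      have := hdom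
      unfold Dom_ixed_factorial pvDomInt at this
      simp only [Bool.and_eq_true, decide_eq_true_eq] at this
      exact this.1.2
    obtain ⟨m, hm1, hm2, hm3⟩ := interval value (by omega) hdom'
    have hstr : pyFactCollect (value + 2).toNat value 1 1 = (List.range' 0 (m + 1)).map F :=
      strides_char m value hm1 hm2
    have hlenstr : (pyFactCollect (value + 2).toNat value 1 1).length = m + 1 := by
      rw [hstr]; simp
    have hpre' : m + 1 ≤ stack.length := by
      have := hpre; unfold Pre_ixed_factorial at this; omega
    have hcond : ¬ stack.length < m + 1 := by omega
    have htail : PySem.List.slice stack (some ((stack.length - (m + 1) : Nat) : Int)) none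
        = stack.drop (stack.length - (m + 1)) := PySem.List.slice_from_natCast _ _
    have htaillen : (stack.drop (stack.length - (m + 1))).length = m + 1 := by
      simp [List.length_drop]; omega
    unfold ixed_factorial ixed_factorial_alt
    simp only [hb, hstr, List.length_map, List.length_range', if_neg hcond, htail]
    rw [show ((List.range' 0 (m + 1)).map F).reverse = revList m from revList_eq m]
    have hrep := dropTaken_replicate (stack.drop (stack.length - (m + 1)))
    rw [htaillen] at hrep
    conv_lhs => rw [← hrep]
    exact main_loop m value (List.replicate (m + 1) false) _ []
      (by rw [List.length_replicate, htaillen]) (by omega) hm2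
      (by rw [hrep]; exact htaillen)
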